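-- pv_equiv track=rewrite | github.com/amirdnc/active-relation-extruction | tools/dataset_creator.py | get_realtion_offset
-- ===== SOURCE A (Python) =====
-- def get_realtion_offset(relations):
--     cur_l = relations[0]['relation']
--     rels_idx= {}
--     start_idx = 0
--     for i, sen in enumerate(relations):
--         if cur_l != sen['relation']:
--             rels_idx[cur_l] = (start_idx, i -1)
--             start_idx = i
--             cur_l = sen['relation']
--     rels_idx[cur_l] = (start_idx, len(relations) - 1)
--     return rels_idx
-- ===== SOURCE B (Python) =====
-- def get_realtion_offset(relations):
--     keys = [sen['relation'] for sen in relations]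
--     n = len(keys)
--     starts = [(0, keys[0])] + [(i, b) for i, (a, b) in enumerate(zip(keys, keys[1:]), 1) if a != b]
--     ends = [s for s, _ in starts[1:]] + [n]
--     return {k: (s, e - 1) for (s, k), e in zip(starts, ends)}
-- ===== Notes on version B (the rewrite author's own statement) =====
-- stated objective: alternative
-- what changed: Replaces A's single stateful pass (cur_l/start_idx carried through the loop, emitting on boundary detection) with three staged passes: extract the key list, collect run-start positions by comparing adjacent key pairs, pair each start with the next start to build the dict.
import Mathlib
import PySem

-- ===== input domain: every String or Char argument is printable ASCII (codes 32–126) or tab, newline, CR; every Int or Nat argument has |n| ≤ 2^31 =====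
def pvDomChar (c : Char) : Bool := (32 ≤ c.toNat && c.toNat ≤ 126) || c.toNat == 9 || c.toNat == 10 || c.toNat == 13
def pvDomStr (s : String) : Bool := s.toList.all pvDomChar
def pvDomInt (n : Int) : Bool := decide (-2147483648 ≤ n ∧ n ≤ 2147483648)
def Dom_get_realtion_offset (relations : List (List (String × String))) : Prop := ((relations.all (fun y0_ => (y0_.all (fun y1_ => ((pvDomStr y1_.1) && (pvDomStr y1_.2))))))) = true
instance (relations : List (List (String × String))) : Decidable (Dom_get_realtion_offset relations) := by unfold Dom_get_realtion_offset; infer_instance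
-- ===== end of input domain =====

-- B replaces A's single stateful boundary-detection loop (cur_l/start_idx state) with
-- three staged passes: extract the key list, collect run-start positions by comparing
-- adjacent key pairs, pair each start with the next start to build the dict. Same cost.
-- Return-value equivalence on nonempty inputs whose elements all carry the 'relation'
-- key (elsewhere both Pythons raise: IndexError on [], KeyError on a missing key).

-- ===== PORT A =====
-- sen['relation']; under Pre_ the key is present, so the default is never read.
def pvRel (sen : List (String × String)) : String :=
  (sen.lookup "relation").getD ""

-- the 'for i, sen in enumerate(relations)' loop, state (cur_l, start_idx, rels_idx); i is the index of the list head
def pvALoop (sens : List (List (String × String))) (i : Int) (cur_l : String) (start_idx : Int)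
    (rels_idx : PySem.Dict String (Int × Int)) : String × Int × PySem.Dict String (Int × Int) :=
  match sens with
  | [] => (cur_l, start_idx, rels_idx)
  | sen :: rest =>
    if cur_l ≠ pvRel sen then
      pvALoop rest (i + 1) (pvRel sen) i (rels_idx.insert cur_l (start_idx, i - 1))
    else
      pvALoop rest (i + 1) cur_l start_idx rels_idx

def get_realtion_offset (relations : List (List (String × String))) : List (String × Int × Int) :=
  match PySem.List.pyGet? relations 0 with
  | none => []          -- IndexError: excluded by Pre_
  | some first =>
    match first.lookup "relation" with
    | none => []        -- KeyError: excluded by Pre_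
    | some cur0 =>
      let st := pvALoop relations 0 cur0 0 PySem.Dict.empty
      (st.2.2.insert st.1 (st.2.1, (relations.length : Int) - 1)).items

-- ===== PORT B =====
def get_realtion_offset_alt (relations : List (List (String × String))) : List (String × Int × Int) :=
  let keys := relations.map pvRel                       -- KeyError excluded by Pre_
  let n : Int := keys.length
  -- starts = [(0, keys[0])] + [(i, b) for i, (a, b) in enumerate(zip(keys, keys[1:]), 1) if a != b]
  -- (keys[0] raises IndexError on the empty list: excluded by Pre_)
  let starts : List (Int × String) :=
    [((0 : Int), (PySem.List.pyGet? keys 0).getD "")] ++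
      (PySem.List.enumerate (keys.zip (keys.drop 1)) 1).filterMap
        (fun p => if p.2.1 ≠ p.2.2 then some (p.1, p.2.2) else none)
  -- ends = [s for s, _ in starts[1:]] + [n]
  let ends : List Int := (starts.drop 1).map (·.1) ++ [n]
  -- {k: (s, e - 1) for (s, k), e in zip(starts, ends)}
  ((starts.zip ends).foldl (fun d p => d.insert p.1.2 (p.1.1, p.2 - 1))
      (PySem.Dict.empty : PySem.Dict String (Int × Int))).items

-- ===== PRECONDITION & SPEC =====
-- Pre_ excludes exactly where both Pythons raise: the empty list (IndexError) and any
-- element lacking the 'relation' key (KeyError).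
def Pre_get_realtion_offset (relations : List (List (String × String))) : Prop :=
  relations ≠ [] ∧ ∀ sen ∈ relations, (sen.lookup "relation").isSome
instance (relations : List (List (String × String))) : Decidable (Pre_get_realtion_offset relations) := by
  unfold Pre_get_realtion_offset; infer_instance

def pvWitness_get_realtion_offset : (List (List (String × String))) :=
  [[("relation", "a")], [("relation", "a")], [("relation", "b")]]

def Spec_get_realtion_offset (relations : List (List (String × String))) (out : List (String × Int × Int)) : Prop := out = get_realtion_offset_alt relations
instance (relations : List (List (String × String))) (out : List (String × Int × Int)) : Decidable (Spec_get_realtion_offset relations out) := by unfold Spec_get_realtion_offset; infer_instance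

-- ===== CLAIM (what is proved, stated in full; the proofs are below) =====
def Claim_equal_get_realtion_offset : Prop := ∀ (relations : List (List (String × String))), Dom_get_realtion_offset relations → Pre_get_realtion_offset relations → Spec_get_realtion_offset relations (get_realtion_offset relations)

-- ===== LEMMAS AND PROOFS =====

-- run decomposition of a key list: (key, start, inclusive end) of each maximal run
def pvRuns : List String → Int → List (String × Int × Int)
  | [], _ => []
  | k :: ks, off =>
    (k, off, off + (ks.takeWhile (· == k)).length) ::
      pvRuns (ks.dropWhile (· == k)) (off + 1 + (ks.takeWhile (· == k)).length)
termination_by keys => keys.length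
decreasing_by
  simp only [List.length_cons]
  exact Nat.lt_succ_of_le (List.length_dropWhile_le _ _)

-- fold the runs into a dict
def pvDict (rs : List (String × Int × Int)) (d : PySem.Dict String (Int × Int)) :
    PySem.Dict String (Int × Int) :=
  rs.foldl (fun d t => d.insert t.1 t.2) d

-- A's loop skips over a whole run of elements whose key equals cur_l.
theorem pvALoop_run (r : List (List (String × String))) (cur : String)
    (hr : ∀ y ∈ r, pvRel y = cur) :
    ∀ (rest : List (List (String × String))) (i start : Int) (d : PySem.Dict String (Int × Int)),
      pvALoop (r ++ rest) i cur start d = pvALoop rest (i + r.length) cur start d := by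
  induction r with
  | nil => intro rest i start d; simp only [List.nil_append, List.length_nil, Int.natCast_zero, add_zero]
  | cons y ys ih =>
    intro rest i start d
    have hy : pvRel y = cur := hr y (List.mem_cons_self ..)
    have hys : ∀ z ∈ ys, pvRel z = cur := fun z hz => hr z (List.mem_cons_of_mem _ hz)
    simp only [List.cons_append, pvALoop, hy, ne_eq, not_true_eq_false, ite_false]
    rw [ih hys]
    congr 1
    simp only [List.length_cons]
    push_cast
    omega

-- runs of the key list = one run peeled from the relations, read through pvRel
theorem pvRuns_map_cons (x : List (String × String)) (xs : List (List (String × String))) (j : Int) :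
    pvRuns ((x :: xs).map pvRel) j =
      (pvRel x, j, j + ((xs.takeWhile (fun y => pvRel y == pvRel x)).length : Int)) ::
        pvRuns ((xs.dropWhile (fun y => pvRel y == pvRel x)).map pvRel)
          (j + 1 + ((xs.takeWhile (fun y => pvRel y == pvRel x)).length : Int)) := by
  simp only [List.map_cons, pvRuns, List.takeWhile_map, List.dropWhile_map, List.length_map]
  rfl

-- Main A-side invariant: A's loop started at the beginning of a run folds the runs.
theorem pvMain (x : List (String × String)) (xs : List (List (String × String)))
    (j : Int) (d : PySem.Dict String (Int × Int)) :
    (let st := pvALoop (x :: xs) j (pvRel x) j d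
     st.2.2.insert st.1 (st.2.1, j + ((x :: xs).length : Int) - 1))
    = pvDict (pvRuns ((x :: xs).map pvRel) j) d := by
  induction hn : (x :: xs).length using Nat.strong_induction_on generalizing x xs j d with
  | _ n ih =>
  subst hn
  have hsplit : xs = xs.takeWhile (fun y => pvRel y == pvRel x) ++ xs.dropWhile (fun y => pvRel y == pvRel x) :=
    (List.takeWhile_append_dropWhile).symm
  set r := xs.takeWhile (fun y => pvRel y == pvRel x) with hrdef
  set rest := xs.dropWhile (fun y => pvRel y == pvRel x) with hrestdef
  have hr : ∀ y ∈ r, pvRel y = pvRel x := by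
    intro y hy
    have := List.mem_takeWhile_imp hy
    simpa using this
  have hA1 : pvALoop (x :: xs) j (pvRel x) j d = pvALoop xs (j + 1) (pvRel x) j d := by
    simp [pvALoop]
  have hA2 : pvALoop xs (j + 1) (pvRel x) j d = pvALoop rest (j + 1 + r.length) (pvRel x) j d := by
    conv_lhs => rw [hsplit]
    exact pvALoop_run r (pvRel x) hr rest (j + 1) j d
  have hlen : xs.length = r.length + rest.length := by
    conv_lhs => rw [hsplit]
    simp
  have hB : pvDict (pvRuns ((x :: xs).map pvRel) j) d
      = pvDict (pvRuns (rest.map pvRel) (j + 1 + r.length))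
          (d.insert (pvRel x) (j, j + (r.length : Int))) := by
    rw [pvRuns_map_cons]
    rfl
  simp only
  cases hrest : rest with
  | nil =>
    rw [hB, hrest]
    simp only [List.map_nil, pvRuns, pvDict, List.foldl_nil]
    rw [hA1, hA2, hrest]
    simp only [pvALoop]
    have hxs : xs.length = r.length := by rw [hlen, hrest]; simp
    have hend : j + ((x :: xs).length : Int) - 1 = j + (r.length : Int) := by
      simp only [List.length_cons, hxs]
      push_cast
      omega
    rw [hend]
  | cons y ys =>
    have hy : pvRel y ≠ pvRel x := by
      have := List.head?_dropWhile_not (fun y => pvRel y == pvRel x) xs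
      rw [← hrestdef, hrest] at this
      simpa using this
    set j' : Int := j + 1 + r.length with hj'
    set d' : PySem.Dict String (Int × Int) := d.insert (pvRel x) (j, j + (r.length : Int)) with hd'
    have hA3 : pvALoop rest (j + 1 + r.length) (pvRel x) j d
        = pvALoop ys (j' + 1) (pvRel y) j' d' := by
      rw [hrest]
      simp only [pvALoop]
      rw [if_pos (fun h => hy h.symm)]
      have e : j + 1 + (r.length : Int) - 1 = j + (r.length : Int) := by ring
      rw [e]
    have hlt : (y :: ys).length < (x :: xs).length := by
      have : rest.length ≤ xs.length := by rw [hlen]; omega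
      rw [hrest] at this
      simp only [List.length_cons] at this ⊢
      omega
    have ihy := ih (y :: ys).length hlt y ys j' d' rfl
    simp only at ihy
    have hstep : pvALoop (y :: ys) j' (pvRel y) j' d' = pvALoop ys (j' + 1) (pvRel y) j' d' := by
      simp [pvALoop]
    rw [hstep] at ihy
    have h2 : xs.length = r.length + (ys.length + 1) := by
      rw [hlen, hrest]; simp
    have hend : j + ((x :: xs).length : Int) - 1 = j' + ((y :: ys).length : Int) - 1 := by
      simp only [List.length_cons, h2, hj']
      push_cast
      omega
    rw [hA1, hA2, hA3, hend, ihy, hB, hrest]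

-- ===== B side =====

-- the staged-passes pipeline of B, with a general offset (the port is the case off = 0)
def pvTri (keys : List String) (off : Int) : List (String × Int × Int) :=
  match keys with
  | [] => []
  | k :: ks =>
    let starts : List (Int × String) :=
      (off, k) ::
        (PySem.List.enumerate ((k :: ks).zip ks) (off + 1)).filterMap
          (fun p => if p.2.1 ≠ p.2.2 then some (p.1, p.2.2) else none)
    let ends : List Int := (starts.drop 1).map (·.1) ++ [off + ((k :: ks).length : Int)]
    (starts.zip ends).map (fun p => (p.1.2, p.1.1, p.2 - 1))

-- adjacent-pair zip of a run followed by the remainder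
theorem pvZipAdj (k : String) (rest : List String) :
    ∀ (r : List String), (∀ y ∈ r, y = k) →
      (k :: (r ++ rest)).zip (r ++ rest)
        = List.replicate r.length (k, k) ++ (k :: rest).zip rest := by
  intro r
  induction r with
  | nil => intro _; simp
  | cons z zs ih =>
    intro h
    have hz : z = k := h z (List.mem_cons_self ..)
    have hzs : ∀ y ∈ zs, y = k := fun y hy => h y (List.mem_cons_of_mem _ hy)
    subst hz
    simp only [List.cons_append, List.zip_cons_cons, List.length_cons, List.replicate_succ,
      List.cons.injEq, true_and]
    exact ih hzs

-- the staged pipeline computes exactly the run decomposition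
theorem pvTri_eq_runs (keys : List String) (off : Int) :
    pvTri keys off = pvRuns keys off := by
  induction hn : keys.length using Nat.strong_induction_on generalizing keys off with
  | _ n ih =>
  subst hn
  cases keys with
  | nil => simp [pvTri, pvRuns]
  | cons k ks =>
    have hsplit : ks = ks.takeWhile (· == k) ++ ks.dropWhile (· == k) :=
      (List.takeWhile_append_dropWhile).symm
    set r := ks.takeWhile (· == k) with hrdef
    set rest := ks.dropWhile (· == k) with hrestdef
    have hr : ∀ y ∈ r, y = k := by
      intro y hy
      have := List.mem_takeWhile_imp hy
      simpa using this
    have hlen : ks.length = r.length + rest.length := by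
      conv_lhs => rw [hsplit]
      simp
    have hzip : (k :: ks).zip ks = List.replicate r.length (k, k) ++ (k :: rest).zip rest := by
      conv_lhs => rw [hsplit]
      exact pvZipAdj k rest r hr
    -- the replicate part contributes nothing to the filterMap
    have hrep : ∀ (s : Int) (m : Nat),
        (PySem.List.enumerate (List.replicate m ((k : String), k)) s).filterMap
          (fun p => if p.2.1 ≠ p.2.2 then some (p.1, p.2.2) else none) = [] := by
      intro s m
      induction m generalizing s with
      | zero => rfl
      | succ m ihm =>
        simp only [List.replicate_succ, PySem.List.enumerate_cons, List.filterMap_cons]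
        simp only [ne_eq, not_true_eq_false, ite_false]
        exact ihm (s + 1)
    have hfm : (PySem.List.enumerate ((k :: ks).zip ks) (off + 1)).filterMap
        (fun p => if p.2.1 ≠ p.2.2 then some (p.1, p.2.2) else none)
      = (PySem.List.enumerate ((k :: rest).zip rest) (off + 1 + r.length)).filterMap
        (fun p => if p.2.1 ≠ p.2.2 then some (p.1, p.2.2) else none) := by
      rw [hzip, PySem.List.enumerate_append, List.filterMap_append, hrep,
        List.nil_append, List.length_replicate]
    rw [pvRuns]
    cases hrest : rest with
    | nil =>
      rw [hrest] at hfm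
      have hkr : ks = r := by rw [hsplit, hrest, List.append_nil]
      simp only [pvTri, hfm]
      simp only [List.zip_nil_right, PySem.List.enumerate_nil, List.filterMap_nil]
      simp only [List.drop_succ_cons, List.drop_nil, List.map_nil, List.nil_append,
        List.zip_cons_cons, List.zip_nil_right, List.map_cons, List.map_nil]
      have hl : ((k :: ks).length : Int) = 1 + (r.length : Int) := by
        simp [hkr]; omega
      rw [hl]
      have e : off + (1 + (r.length : Int)) - 1 = off + (r.length : Int) := by ring
      rw [e, ← hrdef, ← hrestdef, hrest]
      simp [pvRuns]
    | cons y ys =>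
      have hy : ¬ (y == k) = true := by
        have := List.head?_dropWhile_not (· == k) ks
        rw [← hrestdef, hrest] at this
        simpa using this
      have hky : k ≠ y := fun h => hy (by simp [h.symm])
      have hlt : (y :: ys).length < (k :: ks).length := by
        have : rest.length ≤ ks.length := by rw [hlen]; omega
        rw [hrest] at this
        simp only [List.length_cons] at this ⊢
        omega
      have ihrest := ih (y :: ys).length hlt (y :: ys) (off + 1 + r.length) rfl
      rw [hrest] at hfm
      -- peel the boundary pair (k, y) off the filterMap
      have hfm2 : (PySem.List.enumerate ((k :: ks).zip ks) (off + 1)).filterMap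
          (fun p => if p.2.1 ≠ p.2.2 then some (p.1, p.2.2) else none)
        = (off + 1 + (r.length : Int), y) ::
            (PySem.List.enumerate ((y :: ys).zip ys) (off + 1 + r.length + 1)).filterMap
              (fun p => if p.2.1 ≠ p.2.2 then some (p.1, p.2.2) else none) := by
        rw [hfm]
        simp only [List.zip_cons_cons, PySem.List.enumerate_cons, List.filterMap_cons]
        simp only [ne_eq, hky, not_false_eq_true, ite_true]
      have hlenk : off + ((k :: ks).length : Int) = (off + 1 + r.length) + ((y :: ys).length : Int) := by
        have : ks.length = r.length + (ys.length + 1) := by rw [hlen, hrest]; simp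
        simp only [List.length_cons, this]
        push_cast
        ring
      simp only [pvTri, hfm2] at ihrest ⊢
      simp only [List.drop_succ_cons, List.drop_zero, List.map_cons, List.cons_append,
        List.zip_cons_cons, List.map_cons] at ihrest ⊢
      rw [hlenk, ihrest, ← hrdef, ← hrestdef, hrest]
      simp only [List.cons.injEq, Prod.mk.injEq, true_and]
      exact ⟨by ring, trivial⟩

-- B's port is the off = 0 instance of the staged pipeline, folded into a dict
theorem pvAlt_eq_runs (x : List (String × String)) (xs : List (List (String × String))) :
    get_realtion_offset_alt (x :: xs)
      = (pvDict (pvRuns ((x :: xs).map pvRel) 0) PySem.Dict.empty).items := by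
  rw [get_realtion_offset_alt]
  simp only [List.map_cons, List.singleton_append]
  have h0 : (PySem.List.pyGet? (pvRel x :: xs.map pvRel) (0 : Int)).getD "" = pvRel x := by
    simp [PySem.List.pyGet?, PySem.List.pyIdx?]
  rw [h0]
  have htri := pvTri_eq_runs (pvRel x :: xs.map pvRel) 0
  simp only [pvTri, zero_add] at htri
  rw [pvDict, ← htri, List.foldl_map]
  simp only [List.drop_one, List.tail_cons]

theorem get_realtion_offset_eq_alt (relations : List (List (String × String)))
    (hpre : Pre_get_realtion_offset relations) :
    get_realtion_offset relations = get_realtion_offset_alt relations := by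
  obtain ⟨hne, hkeys⟩ := hpre
  cases relations with
  | nil => exact absurd rfl hne
  | cons x xs =>
    have hx : (x.lookup "relation").isSome := hkeys x (List.mem_cons_self ..)
    obtain ⟨cur0, hcur0⟩ := Option.isSome_iff_exists.mp hx
    have h0 : PySem.List.pyGet? (x :: xs) (0 : Int) = some x := by
      simp [PySem.List.pyGet?, PySem.List.pyIdx?]
    rw [get_realtion_offset, h0]
    simp only [hcur0]
    have hrel : pvRel x = cur0 := by simp [pvRel, hcur0]
    have hmain := pvMain x xs 0 PySem.Dict.empty
    simp only at hmain
    rw [← hrel]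
    rw [show ((0 : Int) + ((x :: xs).length : Int) - 1) = ((x :: xs).length : Int) - 1 by ring] at hmain
    rw [hmain, pvAlt_eq_runs]

-- ===== VERDICT (by name: the statement is the Claim_ definition above) =====
theorem get_realtion_offset_spec : Claim_equal_get_realtion_offset := by
  intro relations _ hpre
  unfold Spec_get_realtion_offset
  exact get_realtion_offset_eq_alt relations hpre
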